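-- pv_equiv track=rewrite | github.com/ni-kismet/systemlink-cli | slcli/platform.py | _detect_platform_from_services
-- ===== SOURCE A (Python) =====
-- from typing import Any, Dict, List, Optional, Tuple
--
-- PLATFORM_SLE = "SLE"  # SystemLink Enterprise (cloud)
--
-- PLATFORM_SLS = "SLS"  # SystemLink Server (on-premises)
--
-- PLATFORM_UNKNOWN = "unknown"
--
-- SLE_ONLY_SERVICE_NAMES = (
--     "Dynamic Form Fields",
--     "Comments",
--     "Notebook",
--     "Routine v2",
-- )
--
-- def _detect_platform_from_services(services: Dict[str, str]) -> str:
--     """Infer the platform from SLE-only service probes.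
--
--     Args:
--         services: Mapping of service display name to probe status.
--
--     Returns:
--         PLATFORM_SLE when any SLE-only service is reachable or explicitly
--         unauthorized, PLATFORM_SLS when all SLE-only services are missing,
--         otherwise PLATFORM_UNKNOWN.
--     """
--     sle_statuses = [services.get(name) for name in SLE_ONLY_SERVICE_NAMES if name in services]
--     if not sle_statuses:
--         return PLATFORM_UNKNOWN
--
--     if any(status in ("ok", "unauthorized") for status in sle_statuses):
--         return PLATFORM_SLE
--
--     if all(status == "not_found" for status in sle_statuses):
--         return PLATFORM_SLS
--
--     return PLATFORM_UNKNOWN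
-- ===== SOURCE B (Python) =====
-- PLATFORM_SLE = "SLE"
-- PLATFORM_SLS = "SLS"
-- PLATFORM_UNKNOWN = "unknown"
--
-- SLE_ONLY_SERVICE_NAMES = (
--     "Dynamic Form Fields",
--     "Comments",
--     "Notebook",
--     "Routine v2",
-- )
--
-- # Severity of one probe status: 2 = positive SLE evidence, 0 = cleanly missing, 1 = inconclusive.
-- _RANK = {"ok": 2, "unauthorized": 2, "not_found": 0}
--
-- # Final verdict keyed by the maximum severity seen (-1 = no SLE-only probe present).
-- _VERDICT = {-1: PLATFORM_UNKNOWN, 0: PLATFORM_SLS, 1: PLATFORM_UNKNOWN, 2: PLATFORM_SLE}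
--
-- def _detect_platform_from_services(services):
--     """Scan the services mapping itself, fold the matched statuses into a
--     maximum severity, and decode it through a verdict table."""
--     sev = -1
--     for name, status in services.items():
--         if name in SLE_ONLY_SERVICE_NAMES:
--             sev = max(sev, _RANK.get(status, 1))
--     return _VERDICT[sev]
-- ===== Notes on version B (the rewrite author's own statement) =====
-- stated objective: alternative
-- what changed: Instead of collecting statuses for the constant name tuple and running separate any/all passes, B iterates over the services mapping itself, maps each matched status to a numeric severity (2 = ok/unauthorized, 0 = not_found, 1 = other), folds them with max, and decodes the final severity through a verdict lookup table.
import Mathlib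
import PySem

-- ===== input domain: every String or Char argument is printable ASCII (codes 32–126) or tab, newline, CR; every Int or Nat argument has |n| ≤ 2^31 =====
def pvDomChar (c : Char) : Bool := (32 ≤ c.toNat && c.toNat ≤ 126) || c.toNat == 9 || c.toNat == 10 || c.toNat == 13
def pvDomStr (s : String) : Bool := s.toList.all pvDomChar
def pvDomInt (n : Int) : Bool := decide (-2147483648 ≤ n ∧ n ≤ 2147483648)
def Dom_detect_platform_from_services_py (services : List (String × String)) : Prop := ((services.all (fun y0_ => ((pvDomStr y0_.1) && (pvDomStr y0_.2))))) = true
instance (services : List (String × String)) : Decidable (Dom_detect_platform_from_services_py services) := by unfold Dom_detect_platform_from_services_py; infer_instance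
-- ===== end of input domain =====

-- B replaces A's collect-then-any/all scheme by a different algorithm: it scans the services
-- mapping itself, folds each matched status's numeric severity (2 = ok/unauthorized, 0 = not_found,
-- 1 = other) with max, and decodes the final severity through a verdict table; same results.


def sleOnlyServiceNames : List String :=
  ["Dynamic Form Fields", "Comments", "Notebook", "Routine v2"]

-- ===== PORT A =====
-- sle_statuses = [services.get(name) for name in SLE_ONLY_SERVICE_NAMES if name in services];
-- then empty-check, any(status in ("ok","unauthorized")), all(status == "not_found").
def detect_platform_from_services_py (services : List (String × String)) : String :=
  let d := PySem.Dict.mk services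
  let sle_statuses :=
    (sleOnlyServiceNames.filter (fun name => d.contains name)).map (fun name => d.get? name)
  if sle_statuses.isEmpty then "unknown"
  else if sle_statuses.any (fun status => status == some "ok" || status == some "unauthorized") then "SLE"
  else if sle_statuses.all (fun status => status == some "not_found") then "SLS"
  else "unknown"

-- ===== PORT B =====
-- _RANK = {"ok": 2, "unauthorized": 2, "not_found": 0}
def rankDict : PySem.Dict String Int :=
  PySem.Dict.mk [("ok", 2), ("unauthorized", 2), ("not_found", 0)]

-- _VERDICT = {-1: unknown, 0: SLS, 1: unknown, 2: SLE}
def verdictDict : PySem.Dict Int String :=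
  PySem.Dict.mk [(-1, "unknown"), (0, "SLS"), (1, "unknown"), (2, "SLE")]

-- for name, status in services.items(): if name in SLE_ONLY_SERVICE_NAMES: sev = max(sev, _RANK.get(status, 1));
-- return _VERDICT[sev].  _VERDICT[sev] could raise KeyError only if sev ∉ {-1, 0, 1, 2}, which never
-- happens (sev starts at -1 and every rank is 0, 1 or 2), so the '.getD ""' total lookup is exact here.
def detect_platform_from_services_py_alt (services : List (String × String)) : String :=
  let d := PySem.Dict.mk services
  let sev := d.items.foldl
    (fun sev kv =>
      if sleOnlyServiceNames.contains kv.1 then max sev (rankDict.getD kv.2 1) else sev)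
    (-1 : Int)
  (verdictDict.get? sev).getD ""

-- ===== PRECONDITION & SPEC =====
-- Pre_ excludes association lists with duplicate keys: A's parameter is a Python dict, whose keys
-- are unique, so such lists represent no dict input; which duplicate wins there is a
-- first-vs-last-match artefact of the list encoding.
def Pre_detect_platform_from_services_py (services : List (String × String)) : Prop :=
  (services.map Prod.fst).Nodup
instance (services : List (String × String)) : Decidable (Pre_detect_platform_from_services_py services) := by unfold Pre_detect_platform_from_services_py; infer_instance

def pvWitness_detect_platform_from_services_py : (List (String × String)) :=
  [("Comments", "ok"), ("Notebook", "not_found")]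

def Spec_detect_platform_from_services_py (services : List (String × String)) (out : String) : Prop := out = detect_platform_from_services_py_alt services
instance (services : List (String × String)) (out : String) : Decidable (Spec_detect_platform_from_services_py services out) := by unfold Spec_detect_platform_from_services_py; infer_instance

-- ===== CLAIM (what is proved, stated in full; the proofs are below) =====
def Claim_equal_detect_platform_from_services_py : Prop := ∀ (services : List (String × String)), Dom_detect_platform_from_services_py services → Pre_detect_platform_from_services_py services → Spec_detect_platform_from_services_py services (detect_platform_from_services_py services)

-- ===== LEMMAS AND PROOFS =====

theorem pvRank_eq (v : String) :
    rankDict.getD v 1 =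
      if v = "ok" then 2 else if v = "unauthorized" then 2 else if v = "not_found" then 0 else 1 := by
  simp only [rankDict, PySem.Dict.getD_eq_get?_getD, PySem.Dict.get?_mk_cons, beq_iff_eq]
  by_cases h1 : v = "ok"
  · subst h1; decide
  · by_cases h2 : v = "unauthorized"
    · subst h2; decide
    · by_cases h3 : v = "not_found"
      · subst h3; decide
      · rw [if_neg (fun h => h1 h.symm), if_neg (fun h => h2 h.symm), if_neg (fun h => h3 h.symm),
            if_neg h1, if_neg h2, if_neg h3]
        rfl

theorem pvRank_cases (v : String) :
    rankDict.getD v 1 = 0 ∨ rankDict.getD v 1 = 1 ∨ rankDict.getD v 1 = 2 := by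
  rw [pvRank_eq]; split_ifs <;> simp

theorem pvRank_two_iff (v : String) :
    rankDict.getD v 1 = 2 ↔ (v = "ok" ∨ v = "unauthorized") := by
  rw [pvRank_eq]; split_ifs <;> simp_all

theorem pvRank_zero_iff (v : String) :
    rankDict.getD v 1 = 0 ↔ v = "not_found" := by
  rw [pvRank_eq]; split_ifs <;> simp_all

theorem a_eq_b (services : List (String × String))
    (hpre : (services.map Prod.fst).Nodup) :
    detect_platform_from_services_py services = detect_platform_from_services_py_alt services := by
  have hnd : (PySem.Dict.mk services).keys.Nodup := hpre
  simp only [detect_platform_from_services_py, detect_platform_from_services_py_alt]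
  rw [show (List.foldl
      (fun sev kv => if sleOnlyServiceNames.contains kv.1 = true then max sev (rankDict.getD kv.2 1) else sev)
      (-1 : Int) services) = (services.filter (fun kv => sleOnlyServiceNames.contains kv.1)).foldl
      (fun sev kv => max sev (rankDict.getD kv.2 1)) (-1 : Int) from
      PySem.List.foldl_if_eq_foldl_filter _ _ _ _]
  set d := PySem.Dict.mk services with hd
  set F := services.filter (fun kv => sleOnlyServiceNames.contains kv.1) with hF
  set T := F.map (fun kv => rankDict.getD kv.2 1) with hT
  have hfold : F.foldl (fun sev kv => max sev (rankDict.getD kv.2 1)) (-1 : Int)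
      = T.foldl max (-1 : Int) := by
    rw [hT, List.foldl_map]
  rw [hfold]
  set sev := T.foldl max (-1 : Int) with hsev
  set S := (sleOnlyServiceNames.filter (fun name => d.contains name)).map (fun name => d.get? name)
    with hS
  -- element shape of T
  have hTrank : ∀ y ∈ T, y = 0 ∨ y = 1 ∨ y = 2 := by
    intro y hy
    rw [hT] at hy
    obtain ⟨kv, _, rfl⟩ := List.mem_map.1 hy
    exact pvRank_cases kv.2
  have hub := PySem.List.le_foldl_max T (-1 : Int)
  have hmm := PySem.List.foldl_max_mem T (-1 : Int)
  rw [← hsev] at hub hmm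
  -- the three conditions
  by_cases hP1 : ∃ kv ∈ services, kv.1 ∈ sleOnlyServiceNames
  · -- S and T nonempty
    obtain ⟨kv, hkv, hkn⟩ := hP1
    have hget : d.get? kv.1 = some kv.2 :=
      (PySem.Dict.get?_eq_some_iff_mem_items d kv.1 kv.2 hnd).2 hkv
    have hcont : d.contains kv.1 = true := by
      rw [PySem.Dict.contains_eq_isSome_get?, hget]; rfl
    have hkvF : kv ∈ F := by
      rw [hF]; exact List.mem_filter.2 ⟨hkv, by simpa [List.contains_iff_mem] using hkn⟩
    have hSm : d.get? kv.1 ∈ S := by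
      rw [hS]; exact List.mem_map_of_mem (List.mem_filter.2 ⟨hkn, hcont⟩)
    have hSne : S.isEmpty = false := by
      cases hE : S.isEmpty
      · rfl
      · simp [List.isEmpty_iff.mp hE] at hSm
    rw [hSne]
    simp only [Bool.false_eq_true, if_false]
    by_cases hP2 : ∃ kv ∈ services, kv.1 ∈ sleOnlyServiceNames ∧ (kv.2 = "ok" ∨ kv.2 = "unauthorized")
    · -- SLE
      obtain ⟨p, hp, hpn, hps⟩ := hP2
      have hgetp : d.get? p.1 = some p.2 :=
        (PySem.Dict.get?_eq_some_iff_mem_items d p.1 p.2 hnd).2 hp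
      have hcontp : d.contains p.1 = true := by
        rw [PySem.Dict.contains_eq_isSome_get?, hgetp]; rfl
      have hany : S.any (fun status => status == some "ok" || status == some "unauthorized") = true := by
        refine List.any_eq_true.2 ⟨d.get? p.1, ?_, ?_⟩
        · rw [hS]; exact List.mem_map_of_mem (List.mem_filter.2 ⟨hpn, hcontp⟩)
        · rw [hgetp]; rcases hps with h | h <;> simp [h]
      rw [hany]
      have h2T : (2 : Int) ∈ T := by
        rw [hT]
        refine List.mem_map.2 ⟨p, ?_, ?_⟩
        · rw [hF]; exact List.mem_filter.2 ⟨hp, by simpa [List.contains_iff_mem] using hpn⟩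
        · exact (pvRank_two_iff p.2).2 hps
      have hle2 : sev ≤ 2 := by
        rcases hmm with h | h
        · omega
        · rcases hTrank sev h with h' | h' | h' <;> omega
      have hge2 : (2 : Int) ≤ sev := hub.2 2 h2T
      have : sev = 2 := le_antisymm hle2 hge2
      rw [this]; rfl
    · have hany : S.any (fun status => status == some "ok" || status == some "unauthorized") = false := by
        rw [List.any_eq_false]
        intro st hst
        rw [hS] at hst
        obtain ⟨n, hn, rfl⟩ := List.mem_map.1 hst
        have hcn : d.contains n = true := (List.mem_filter.1 hn).2
        have hnn : n ∈ sleOnlyServiceNames := (List.mem_filter.1 hn).1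
        rw [PySem.Dict.contains_eq_isSome_get?] at hcn
        obtain ⟨s, hs⟩ := Option.isSome_iff_exists.1 hcn
        have hmemit : (n, s) ∈ services := PySem.Dict.mem_items_of_get?_eq_some d hs
        rw [hs]
        simp only [Bool.or_eq_true, beq_iff_eq, Option.some.injEq, not_or]
        constructor
        · intro h; exact hP2 ⟨(n, s), hmemit, hnn, Or.inl h⟩
        · intro h; exact hP2 ⟨(n, s), hmemit, hnn, Or.inr h⟩
      rw [hany]
      simp only [Bool.false_eq_true, if_false]
      have hno2 : (2 : Int) ∉ T := by
        intro h2
        rw [hT] at h2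
        obtain ⟨p, hpF, hp2⟩ := List.mem_map.1 h2
        rw [hF] at hpF
        obtain ⟨hp, hpc⟩ := List.mem_filter.1 hpF
        exact hP2 ⟨p, hp, by simpa [List.contains_iff_mem] using hpc,
          (pvRank_two_iff p.2).1 hp2⟩
      by_cases hP3 : ∀ kv ∈ services, kv.1 ∈ sleOnlyServiceNames → kv.2 = "not_found"
      · have hall : S.all (fun status => status == some "not_found") = true := by
          rw [List.all_eq_true]
          intro st hst
          rw [hS] at hst
          obtain ⟨n, hn, rfl⟩ := List.mem_map.1 hst
          have hcn : d.contains n = true := (List.mem_filter.1 hn).2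
          have hnn : n ∈ sleOnlyServiceNames := (List.mem_filter.1 hn).1
          rw [PySem.Dict.contains_eq_isSome_get?] at hcn
          obtain ⟨s, hs⟩ := Option.isSome_iff_exists.1 hcn
          have hmemit : (n, s) ∈ services := PySem.Dict.mem_items_of_get?_eq_some d hs
          have := hP3 (n, s) hmemit hnn
          rw [hs]; simpa using this
        rw [hall]
        have h0T : (0 : Int) ∈ T := by
          rw [hT]
          refine List.mem_map.2 ⟨kv, hkvF, ?_⟩
          exact (pvRank_zero_iff kv.2).2 (hP3 kv hkv hkn)
        have hT0 : ∀ y ∈ T, y = (0 : Int) := by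
          intro y hy
          rw [hT] at hy
          obtain ⟨p, hpF, rfl⟩ := List.mem_map.1 hy
          rw [hF] at hpF
          obtain ⟨hp, hpc⟩ := List.mem_filter.1 hpF
          exact (pvRank_zero_iff p.2).2 (hP3 p hp (by simpa [List.contains_iff_mem] using hpc))
        have hge0 : (0 : Int) ≤ sev := hub.2 0 h0T
        have hsev0 : sev = 0 := by
          rcases hmm with h | h
          · omega
          · exact hT0 sev h
        rw [hsev0]; rfl
      · have hall : S.all (fun status => status == some "not_found") = false := by
          push Not at hP3
          obtain ⟨p, hp, hpn, hps⟩ := hP3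
          have hgetp : d.get? p.1 = some p.2 :=
            (PySem.Dict.get?_eq_some_iff_mem_items d p.1 p.2 hnd).2 hp
          have hcontp : d.contains p.1 = true := by
            rw [PySem.Dict.contains_eq_isSome_get?, hgetp]; rfl
          rw [List.all_eq_false]
          refine ⟨d.get? p.1, ?_, ?_⟩
          · rw [hS]; exact List.mem_map_of_mem (List.mem_filter.2 ⟨hpn, hcontp⟩)
          · rw [hgetp]; simp [hps]
        rw [hall]
        push Not at hP3
        obtain ⟨p, hp, hpn, hps⟩ := hP3
        have hpF : p ∈ F := by
          rw [hF]; exact List.mem_filter.2 ⟨hp, by simpa [List.contains_iff_mem] using hpn⟩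
        have hrp : rankDict.getD p.2 1 = 1 := by
          rcases pvRank_cases p.2 with h | h | h
          · exact absurd ((pvRank_zero_iff p.2).1 h) hps
          · exact h
          · exact absurd (by
              rw [hT]
              exact List.mem_map.2 ⟨p, hpF, h⟩) hno2
        have h1T : (1 : Int) ∈ T := by
          rw [hT]; exact List.mem_map.2 ⟨p, hpF, hrp⟩
        have hge1 : (1 : Int) ≤ sev := hub.2 1 h1T
        have hsev1 : sev = 1 := by
          rcases hmm with h | h
          · omega
          · rcases hTrank sev h with h' | h' | h'
            · omega
            · exact h'
            · exact absurd (h' ▸ h) hno2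
        rw [hsev1]; rfl
  · -- nothing found: both unknown
    have hSe : S = [] := by
      rw [hS, List.map_eq_nil_iff, List.filter_eq_nil_iff]
      intro n hn hcn
      rw [PySem.Dict.contains_eq_isSome_get?] at hcn
      obtain ⟨s, hs⟩ := Option.isSome_iff_exists.1 hcn
      exact hP1 ⟨(n, s), PySem.Dict.mem_items_of_get?_eq_some d hs, hn⟩
    have hFe : F = [] := by
      rw [hF, List.filter_eq_nil_iff]
      intro kv hkv hc
      exact hP1 ⟨kv, hkv, by simpa [List.contains_iff_mem] using hc⟩
    have hTe : T = [] := by rw [hT, hFe]; rfl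
    have : sev = -1 := by rw [hsev, hTe]; rfl
    rw [hSe, this]; rfl

-- ===== VERDICT (by name: the statement is the Claim_ definition above) =====
theorem detect_platform_from_services_py_spec : Claim_equal_detect_platform_from_services_py := by
  intro services _ hpre
  exact a_eq_b services hpre
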